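-- pv_equiv track=rewrite | github.com/IAmFocus90/quiz-generator-fork | server/app/db/seed_data/seed_all_categories.py | assign_question_types
-- ===== SOURCE A (Python) =====
-- type_map = {
--
--     "multiple choice": range(0, 10),
--
--     "true or false": range(10, 20),
--
--     "open ended": range(20, 30),
--
--     "short answer": range(30, 40),
--
-- }
--
-- def assign_question_types(questions: list) -> list:
--
--     for i, q in enumerate(questions):
--
--         if "question_type" not in q or not q["question_type"].strip():
--
--             for qtype, qrange in type_map.items():
--
--                 if i in qrange:
--
--                     q["question_type"] = qtype
--
--                     break
--
--             else:
--
--                 q["question_type"] = "unknown"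
--
--     return questions
-- ===== SOURCE B (Python) =====
-- def assign_question_types(questions: list) -> list:
--     types = ["multiple choice", "true or false", "open ended", "short answer"]
--     for i, q in enumerate(questions):
--         if not q.get("question_type", "").strip():
--             q["question_type"] = types[i // 10] if i < 40 else "unknown"
--     return questions
-- ===== Notes on version B (the rewrite author's own statement) =====
-- stated objective: simpler
-- what changed: replaces the inner scan over the type_map of ranges with a for-else fallback by direct arithmetic: a fixed 4-element list indexed by i // 10 (falling back to 'unknown' when i >= 40), and folds the two-part emptiness guard into one q.get(...).strip() test
import Mathlib
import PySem

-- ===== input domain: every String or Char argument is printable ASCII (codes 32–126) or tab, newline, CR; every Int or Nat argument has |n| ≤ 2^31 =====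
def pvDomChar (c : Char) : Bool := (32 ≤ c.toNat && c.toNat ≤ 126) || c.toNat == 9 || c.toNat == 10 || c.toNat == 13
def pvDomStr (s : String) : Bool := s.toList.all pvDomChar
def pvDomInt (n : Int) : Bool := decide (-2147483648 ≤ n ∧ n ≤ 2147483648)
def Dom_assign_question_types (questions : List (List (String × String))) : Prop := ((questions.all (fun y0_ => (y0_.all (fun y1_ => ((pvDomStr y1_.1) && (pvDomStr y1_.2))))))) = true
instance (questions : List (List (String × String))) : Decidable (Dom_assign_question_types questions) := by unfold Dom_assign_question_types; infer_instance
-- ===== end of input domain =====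

-- B replaces the inner scan over type_map ranges by direct bucket arithmetic (types[i // 10], else "unknown"): simpler.
-- Python A mutates the question dicts in place; the equivalence proved here is about the return value.


-- ===== PORT A =====
-- dict helpers shared by both ports (Python: first-match lookup; q[k] = v overwrites in place or appends)
def dictGet? (q : List (String × String)) (k : String) : Option String :=
  match q with
  | [] => none
  | (k', v) :: rest => if k' == k then some v else dictGet? rest k

def dictSet (q : List (String × String)) (k v : String) : List (String × String) :=
  match q with
  | [] => [(k, v)]
  | (k', v') :: rest => if k' == k then (k', v) :: rest else (k', v') :: dictSet rest k v

-- the module-level type_map: dict of name -> range(lo, hi), in insertion order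
def type_map : List (String × Int × Int) :=
  [("multiple choice", 0, 10), ("true or false", 10, 20), ("open ended", 20, 30), ("short answer", 30, 40)]

-- A's inner 'for qtype, qrange in type_map.items(): … else: "unknown"' (for-else)
def tmLookup (i : Int) (tm : List (String × Int × Int)) : String :=
  match tm with
  | [] => "unknown"
  | (qtype, lo, hi) :: rest => if lo ≤ i ∧ i < hi then qtype else tmLookup i rest

-- A's 'for i, q in enumerate(questions)' as recursion with the index counter
def assignA (i : Int) (qs : List (List (String × String))) : List (List (String × String)) :=
  match qs with
  | [] => []
  | q :: rest =>
    (if (match dictGet? q "question_type" with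
         | none => true
         | some v => PySem.Str.strip v == "") then
       dictSet q "question_type" (tmLookup i type_map)
     else q) :: assignA (i + 1) rest

def assign_question_types (questions : List (List (String × String))) : List (List (String × String)) :=
  assignA 0 questions

-- ===== PORT B =====
def typesB : List String := ["multiple choice", "true or false", "open ended", "short answer"]

-- B's loop: bucket arithmetic types[i // 10] (guard i < 40 keeps the index in range; getD is never the fallback there)
def assignB (i : Int) (qs : List (List (String × String))) : List (List (String × String)) :=
  match qs with
  | [] => []
  | q :: rest =>
    (if PySem.Str.strip ((dictGet? q "question_type").getD "") == "" then
       dictSet q "question_type"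
         (if i < 40 then (PySem.List.pyGet? typesB (PySem.Int.floordiv i 10)).getD "unknown" else "unknown")
     else q) :: assignB (i + 1) rest

def assign_question_types_alt (questions : List (List (String × String))) : List (List (String × String)) :=
  assignB 0 questions

-- ===== PRECONDITION & SPEC =====
def Spec_assign_question_types (questions : List (List (String × String))) (out : List (List (String × String))) : Prop := out = assign_question_types_alt questions
instance (questions : List (List (String × String))) (out : List (List (String × String))) : Decidable (Spec_assign_question_types questions out) := by unfold Spec_assign_question_types; infer_instance

-- ===== CLAIM (what is proved, stated in full; the proofs are below) =====
def Claim_equal_assign_question_types : Prop := ∀ (questions : List (List (String × String))), Dom_assign_question_types questions → Spec_assign_question_types questions (assign_question_types questions)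

-- ===== LEMMAS AND PROOFS =====
lemma tm_eq_bucket (i : Int) (h : 0 ≤ i) :
    tmLookup i type_map
      = (if i < 40 then (PySem.List.pyGet? typesB (PySem.Int.floordiv i 10)).getD "unknown" else "unknown") := by
  rcases lt_or_ge i 40 with h40 | h40
  · obtain ⟨n, rfl⟩ := Int.eq_ofNat_of_zero_le h
    have hn : n < 40 := by exact_mod_cast h40
    have hfd : PySem.Int.floordiv (n : Int) 10 = ((n / 10 : Nat) : Int) := by
      exact_mod_cast PySem.Int.floordiv_natCast n 10
    interval_cases n <;> simp [tmLookup, type_map, typesB, PySem.List.pyGet?, PySem.List.pyIdx?]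
  · simp only [tmLookup, type_map]
    rw [if_neg (by omega), if_neg (by omega), if_neg (by omega), if_neg (by omega), if_neg (by omega)]

lemma cond_eq (q : List (String × String)) :
    (match dictGet? q "question_type" with
     | none => true
     | some v => PySem.Str.strip v == "")
      = (PySem.Str.strip ((dictGet? q "question_type").getD "") == "") := by
  cases dictGet? q "question_type"
  · simp; decide
  · simp

lemma assignA_eq_assignB (qs : List (List (String × String))) :
    ∀ i : Int, 0 ≤ i → assignA i qs = assignB i qs := by
  induction qs with
  | nil => intro i _; rfl
  | cons q rest ih =>
    intro i hi
    simp only [assignA, assignB, cond_eq, tm_eq_bucket i hi]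
    exact congrArg _ (ih (i + 1) (by omega))

-- ===== VERDICT (by name: the statement is the Claim_ definition above) =====
theorem assign_question_types_spec : Claim_equal_assign_question_types := by
  intro qs _
  unfold Spec_assign_question_types assign_question_types assign_question_types_alt
  exact assignA_eq_assignB qs 0 (by omega)
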